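-- pv_equiv track=rewrite | github.com/fwani/forCodingTest | programmers/lv1/신고 결과 받기.py | solution
-- ===== SOURCE A (Python) =====
-- from collections import defaultdict
--
-- def solution(id_list, report, k):
--     reported_users = defaultdict(set)
--     for user_report in report:
--         user, reported_user = user_report.split(" ")
--         reported_users[reported_user].add(user)
--     block_user = []
--     alarm = defaultdict(int)
--     for reported_user, report_user in reported_users.items():
--         if len(report_user) >= k:
--             block_user.append(reported_user)
--             for user in report_user:
--                 alarm[user] += 1
--
--     answer = []
--     for user in id_list:
--         answer.append(alarm[user])
--     return answer
-- ===== SOURCE B (Python) =====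
-- from collections import Counter
--
-- def solution(id_list, report, k):
--     parsed = []
--     for entry in report:
--         reporter, reported = entry.split(" ")
--         parsed.append((reporter, reported))
--     pairs = list(dict.fromkeys(parsed))          # distinct reports, first-seen order
--     counts = Counter(reported for _, reported in pairs)
--     return [sum(1 for reporter, reported in pairs
--                 if reporter == uid and counts[reported] >= k)
--             for uid in id_list]
-- ===== Notes on version B (the rewrite author's own statement) =====
-- stated objective: alternative
-- what changed: Replaces A's dict-of-sets grouping with a nested blocked-set/alarm-increment loop by a flat first-seen-deduplicated pair list, a Counter of distinct reporters per reported user, and a direct per-id count of that user's reports whose target reached k.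
import Mathlib
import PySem

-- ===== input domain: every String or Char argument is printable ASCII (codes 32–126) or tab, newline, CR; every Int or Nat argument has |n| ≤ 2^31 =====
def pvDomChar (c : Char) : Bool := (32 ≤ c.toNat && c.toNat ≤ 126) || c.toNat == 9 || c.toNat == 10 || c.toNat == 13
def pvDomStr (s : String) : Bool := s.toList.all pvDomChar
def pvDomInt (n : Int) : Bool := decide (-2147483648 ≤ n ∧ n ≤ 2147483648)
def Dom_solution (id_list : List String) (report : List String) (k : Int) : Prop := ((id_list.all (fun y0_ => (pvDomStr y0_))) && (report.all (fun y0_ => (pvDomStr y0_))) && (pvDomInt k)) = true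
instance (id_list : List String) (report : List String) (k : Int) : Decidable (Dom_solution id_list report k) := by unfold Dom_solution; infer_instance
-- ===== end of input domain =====

-- B replaces A's dict-of-sets grouping + nested alarm increments by a flat deduplicated
-- pair list, a Counter of reporters per reported user, and a per-id countP (objective: alternative).


-- ===== PORT A =====
-- 'user, reported = entry.split(" ")': the two pieces, none = ValueError (outside Pre_)
def pvSplit2 (entry : String) : Option (String × String) :=
  match PySem.Str.split? entry " " with
  | some [u, v] => some (u, v)
  | _ => none

def solution (id_list : List String) (report : List String) (k : Int) : List Int :=
  -- reported_users = defaultdict(set); for ...: reported_users[reported_user].add(user)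
  let reported_users : PySem.Dict String (PySem.Set String) :=
    report.foldl (fun d entry =>
      match pvSplit2 entry with
      | some p => d.modify p.2 PySem.Set.empty (fun s => PySem.Set.add s p.1)
      | none => d) PySem.Dict.empty
  -- block_user / alarm loop over .items(); the inner 'for user in report_user' consumes the
  -- set only into an int dict that is looked up afterwards (order-independent result)
  let st : List String × PySem.Dict String Int :=
    reported_users.items.foldl (fun st it =>
      if k ≤ (it.2.length : Int) then
        (st.1 ++ [it.1], it.2.foldl (fun al u => al.modify u 0 (· + 1)) st.2)
      else st) ([], PySem.Dict.empty)
  -- answer loop: alarm[user] on defaultdict(int) inserts 0 for missing keys, which never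
  -- changes any later looked-up value, so it is exactly getD _ 0
  id_list.map (fun user => st.2.getD user 0)

-- ===== PORT B =====
def solution_alt (id_list : List String) (report : List String) (k : Int) : List Int :=
  let parsed : List (String × String) :=
    report.foldl (fun acc entry =>
      match pvSplit2 entry with
      | some p => acc ++ [p]
      | none => acc) []
  let pairs := PySem.List.dedup parsed          -- list(dict.fromkeys(parsed))
  let counts := PySem.Dict.counter (pairs.map Prod.snd)
  id_list.map (fun uid =>
    (pairs.countP (fun p => p.1 == uid && decide (k ≤ counts.getD p.2 0)) : Int))

-- ===== PRECONDITION & SPEC =====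
-- Pre_ excludes reports that do not split on " " into exactly two pieces: there Python A
-- (and B) raises ValueError on unpacking.
def Pre_solution (id_list : List String) (report : List String) (k : Int) : Prop :=
  (report.all (fun r => ((PySem.Str.split? r " ").getD []).length == 2)) = true
instance (id_list : List String) (report : List String) (k : Int) : Decidable (Pre_solution id_list report k) := by unfold Pre_solution; infer_instance
def pvWitness_solution : List String × List String × Int :=
  (["muzi", "frodo", "apeach", "neo"], ["muzi frodo", "apeach frodo", "frodo neo", "muzi neo", "apeach muzi"], 2)

def Spec_solution (id_list : List String) (report : List String) (k : Int) (out : List Int) : Prop := out = solution_alt id_list report k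
instance (id_list : List String) (report : List String) (k : Int) (out : List Int) : Decidable (Spec_solution id_list report k out) := by unfold Spec_solution; infer_instance

-- ===== CLAIM (what is proved, stated in full; the proofs are below) =====
def Claim_equal_solution : Prop := ∀ (id_list : List String) (report : List String) (k : Int), Dom_solution id_list report k → Pre_solution id_list report k → Spec_solution id_list report k (solution id_list report k)

-- ===== LEMMAS AND PROOFS =====

-- two nodup lists with the same members have the same length
theorem pv_length_eq_of_nodup {α : Type} [DecidableEq α] {l1 l2 : List α}
    (h1 : l1.Nodup) (h2 : l2.Nodup) (h : ∀ x, x ∈ l1 ↔ x ∈ l2) : l1.length = l2.length := by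
  rw [← List.toFinset_card_of_nodup h1, ← List.toFinset_card_of_nodup h2]
  congr 1; ext x; simp [h x]

-- a fold skipping unparseable entries is a fold over the parsed list
theorem pv_foldl_parse {β : Type} (report : List String) (g : β → (String × String) → β) (d : β) :
    report.foldl (fun d e => match pvSplit2 e with | some p => g d p | none => d) d
      = (report.filterMap pvSplit2).foldl g d := by
  induction report generalizing d with
  | nil => rfl
  | cons e l ih =>
    simp only [List.foldl_cons, List.filterMap_cons]
    cases h : pvSplit2 e <;> simp [ih]

theorem pv_foldl_snoc {α : Type} (l : List α) (acc : List α) :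
    l.foldl (fun a x => a ++ [x]) acc = acc ++ l := by
  induction l generalizing acc with
  | nil => simp
  | cons x l ih => simp [ih]

-- A's grouping dict: value at v is the set of first components of pairs with second v
theorem pv_getD_build (l : List (String × String)) (d : PySem.Dict String (PySem.Set String)) (v : String) :
    (l.foldl (fun d p => d.modify p.2 PySem.Set.empty (fun s => PySem.Set.add s p.1)) d).getD v PySem.Set.empty
      = PySem.Set.update (d.getD v PySem.Set.empty) ((l.filter (fun p => p.2 == v)).map Prod.fst) := by
  induction l generalizing d with
  | nil => simp [PySem.Set.update]
  | cons p l ih =>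
    simp only [List.foldl_cons, List.filter_cons, ih, PySem.Dict.getD_modify]
    by_cases h : p.2 = v
    · simp [h, PySem.Set.update]
    · simp [h, Ne.symm h, beq_iff_eq]

-- mapping over the items of a nodup-keys dict is mapping over its keys with getD
theorem pv_map_items {ν γ : Type} (d : PySem.Dict String ν) (h : d.keys.Nodup) (d0 : ν) (f : String × ν → γ) :
    d.items.map f = d.keys.map (fun v => f (v, d.getD v d0)) := by
  obtain ⟨l⟩ := d
  induction l with
  | nil => rfl
  | cons p rest ih =>
    obtain ⟨a, b⟩ := p
    simp only [PySem.Dict.keys, List.map_cons] at h ⊢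
    rw [List.nodup_cons] at h
    refine List.cons_eq_cons.mpr ⟨?_, ?_⟩
    · simp [PySem.Dict.getD, PySem.Dict.get?]
    · rw [ih h.2]
      simp only [PySem.Dict.keys]
      refine List.map_congr_left (fun v hv => ?_)
      have hne : ¬ (a == v) = true := by
        simp only [beq_iff_eq]; rintro rfl; exact h.1 hv
      simp [PySem.Dict.getD, PySem.Dict.get?, List.find?, hne]

-- the alarm loop: final alarm[uid] = initial + Σ over blocked sets of their count of uid
theorem pv_alarm_fold (k : Int) (its : List (String × PySem.Set String)) :
    ∀ (bs : List String) (a : PySem.Dict String Int) (uid : String),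
    ((its.foldl (fun st it =>
        if k ≤ (it.2.length : Int) then
          (st.1 ++ [it.1], it.2.foldl (fun al u => al.modify u 0 (· + 1)) st.2)
        else st) (bs, a)).2).getD uid 0
      = a.getD uid 0 + ((its.map (fun it => if k ≤ (it.2.length : Int) then ((it.2.count uid : Nat) : Int) else 0)).sum) := by
  induction its with
  | nil => simp
  | cons it l ih =>
    intro bs a uid
    simp only [List.foldl_cons, List.map_cons, List.sum_cons]
    by_cases h : k ≤ (it.2.length : Int)
    · simp only [h, if_true, ih, PySem.Dict.getD_foldl_modify_add_one]
      ring
    · simp only [h, if_false, ih]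
      ring

-- a 0/1 sum is a countP
theorem pv_sum_ite (l : List String) (c : String → Prop) [DecidablePred c] :
    ((l.map (fun v => if c v then (1 : Int) else 0)).sum) = (l.countP (fun v => decide (c v)) : Int) := by
  induction l with
  | nil => simp
  | cons x l ih =>
    simp only [List.map_cons, List.sum_cons, List.countP_cons, ih]
    split <;> simp_all <;> omega

-- regrouping a countP over nodup pairs by the second component
theorem pv_regroup (P : List (String × String)) (hP : P.Nodup) (K : List String) (hK : K.Nodup)
    (hmem : ∀ v, (v ∈ K ↔ ∃ u, (u, v) ∈ P)) (uid : String) (r : String → Bool) :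
    P.countP (fun p => p.1 == uid && r p.2)
      = K.countP (fun v => r v && decide ((uid, v) ∈ P)) := by
  rw [List.countP_eq_length_filter, List.countP_eq_length_filter]
  rw [← List.length_map (f := Prod.snd) (as := P.filter (fun p => p.1 == uid && r p.2))]
  apply pv_length_eq_of_nodup
  · apply List.Nodup.map_on _ (hP.filter _)
    intro p hp q hq hpq
    simp only [List.mem_filter, Bool.and_eq_true, beq_iff_eq] at hp hq
    exact Prod.ext (hp.2.1.trans hq.2.1.symm) hpq
  · exact hK.filter _
  · intro v
    simp only [List.mem_map, List.mem_filter, Bool.and_eq_true, beq_iff_eq, decide_eq_true_eq]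
    constructor
    · rintro ⟨⟨u, w⟩, ⟨hmemP, h1, hr⟩, h2⟩
      subst h1; subst h2
      exact ⟨(hmem _).mpr ⟨_, hmemP⟩, hr, hmemP⟩
    · rintro ⟨-, hr, hmemP⟩
      exact ⟨(uid, v), ⟨hmemP, rfl, hr⟩, rfl⟩

-- B's Counter entry at v is the size of A's reporter set for v
theorem pv_count_snd (L : List (String × String)) (v : String) :
    List.count v ((PySem.List.dedup L).map Prod.snd)
      = (PySem.Set.ofList ((L.filter (fun p => p.2 == v)).map Prod.fst)).length := by
  have hP : (PySem.List.dedup L).Nodup := PySem.List.nodup_dedup L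
  rw [List.count_eq_countP, List.countP_map, List.countP_eq_length_filter]
  rw [← List.length_map (f := Prod.fst) (as := (PySem.List.dedup L).filter _)]
  apply pv_length_eq_of_nodup
  · apply List.Nodup.map_on _ (hP.filter _)
    intro p hp q hq hpq
    simp only [List.mem_filter, Function.comp, beq_iff_eq] at hp hq
    exact Prod.ext hpq (hp.2.trans hq.2.symm)
  · exact (PySem.Set.nodup_ofList _)
  · intro u
    simp [PySem.Set.mem_ofList, Function.comp]

-- ===== VERDICT (by name: the statement is the Claim_ definition above) =====
theorem solution_spec : Claim_equal_solution := by
  intro id_list report k _ _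
  unfold Spec_solution solution solution_alt
  refine List.map_congr_left (fun uid _ => ?_)
  set L := report.filterMap pvSplit2 with hL
  -- B side
  rw [pv_foldl_parse report (fun a p => a ++ [p]) [], pv_foldl_snoc, List.nil_append]
  -- A side
  rw [pv_foldl_parse report (fun d p => d.modify p.2 PySem.Set.empty (fun s => PySem.Set.add s p.1)) PySem.Dict.empty]
  set D := L.foldl (fun d p => d.modify p.2 PySem.Set.empty (fun s => PySem.Set.add s p.1)) PySem.Dict.empty with hD
  have hkeys : D.keys = PySem.Set.ofList (L.map Prod.snd) := by
    rw [hD, PySem.Dict.keys_foldl_modify_key L Prod.snd PySem.Set.empty (fun _ p s => PySem.Set.add s p.1) PySem.Dict.empty]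
    exact PySem.Set.update_nil_left _
  have hnodup : D.keys.Nodup := by rw [hkeys]; exact PySem.Set.nodup_ofList _
  have hgetD : ∀ v, D.getD v PySem.Set.empty
      = PySem.Set.ofList ((L.filter (fun p => p.2 == v)).map Prod.fst) := by
    intro v
    rw [hD, pv_getD_build]
    exact PySem.Set.update_nil_left _
  have hmemS : ∀ v u, u ∈ D.getD v PySem.Set.empty ↔ (u, v) ∈ PySem.List.dedup L := by
    intro v u
    rw [hgetD v]
    simp [PySem.Set.mem_ofList]
  rw [pv_alarm_fold, pv_map_items D hnodup PySem.Set.empty]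
  have hzero : (PySem.Dict.empty : PySem.Dict String Int).getD uid 0 = 0 := rfl
  rw [hzero, zero_add]
  -- turn A's summand into a 0/1 indicator
  have hind : (D.keys.map (fun v =>
        if k ≤ ((D.getD v PySem.Set.empty).length : Int)
        then (((D.getD v PySem.Set.empty).count uid : Nat) : Int) else 0))
      = D.keys.map (fun v =>
        if k ≤ ((D.getD v PySem.Set.empty).length : Int) ∧ uid ∈ D.getD v PySem.Set.empty
        then (1 : Int) else 0) := by
    refine List.map_congr_left (fun v _ => ?_)
    have hnd : (D.getD v PySem.Set.empty).Nodup := by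
      rw [hgetD v]; exact PySem.Set.nodup_ofList _
    by_cases hm : uid ∈ D.getD v PySem.Set.empty
    · rw [List.count_eq_one_of_mem hnd hm]
      by_cases hk : k ≤ ((D.getD v PySem.Set.empty).length : Int) <;>
        simp_all [PySem.Set.empty]
    · rw [List.count_eq_zero_of_not_mem hm]
      by_cases hk : k ≤ ((D.getD v PySem.Set.empty).length : Int) <;>
        simp_all [PySem.Set.empty]
  rw [hind, pv_sum_ite]
  -- B side: counter lookup, then regroup by the reported user
  have hcnt : ∀ p : String × String,
      (PySem.Dict.counter ((PySem.List.dedup L).map Prod.snd)).getD p.2 0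
        = ((List.count p.2 ((PySem.List.dedup L).map Prod.snd) : Nat) : Int) := fun p =>
    PySem.Dict.getD_counter _ _
  have hB : (PySem.List.dedup L).countP (fun p =>
        p.1 == uid && decide (k ≤ (PySem.Dict.counter ((PySem.List.dedup L).map Prod.snd)).getD p.2 0))
      = D.keys.countP (fun v =>
        decide (k ≤ ((List.count v ((PySem.List.dedup L).map Prod.snd) : Nat) : Int))
          && decide ((uid, v) ∈ PySem.List.dedup L)) := by
    rw [List.countP_congr (fun p _ => by rw [hcnt p])]
    exact pv_regroup (PySem.List.dedup L) (PySem.List.nodup_dedup L) D.keys hnodup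
      (fun v => by rw [hkeys]; simp [PySem.Set.mem_ofList]) uid
      (fun v => decide (k ≤ ((List.count v ((PySem.List.dedup L).map Prod.snd) : Nat) : Int)))
  rw [hB]
  -- the two countP agree pointwise on the keys
  congr 1
  refine List.countP_congr (fun v _ => ?_)
  have h1 : List.count v ((PySem.List.dedup L).map Prod.snd) = (D.getD v PySem.Set.empty).length := by
    rw [hgetD v]; exact pv_count_snd L v
  simp only [h1, decide_eq_true_eq, Bool.and_eq_true, ← hmemS v uid, PySem.Set.empty]
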